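-- pv_equiv track=rewrite | github.com/JTTheAxis/thinklikeacompscientist | Chapter 14 Practice.py | mergeB
-- ===== SOURCE A (Python) =====
-- def mergeB(xs, ys):
--     result = []
--     xi = 0
--     yi = 0
--
--     while True:
--         if xi >= len(xs):
--             return result
--
--         if yi >= len(ys):
--             result.extend(xs[xi:])
--             return result
--
--         if xs[xi] <= ys[yi]:
--             result.append(xs[xi])
--             xi += 1
--         else:
--             if ys[yi] in xs:
--                 result.append(ys[yi])
--             yi += 1
-- ===== SOURCE B (Python) =====
-- def mergeB(xs, ys):
--     # Stage 1: for each kept ys-element, compute its insertion index into xs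
--     # (the merge pointer position where A would emit it); stop once xs is exhausted.
--     n = len(xs)
--     pos = []
--     i = 0
--     for y in ys:
--         while i < n and xs[i] <= y:
--             i += 1
--         if i == n:
--             break
--         if y in xs:
--             pos.append((i, y))
--     # Stage 2: assemble the output by slicing xs around the insertion points.
--     out = []
--     j = 0
--     for i, y in pos:
--         out.extend(xs[j:i])
--         out.append(y)
--         j = i
--     out.extend(xs[j:])
--     return out
-- ===== Notes on version B (the rewrite author's own statement) =====
-- stated objective: alternative
-- what changed: A's interleaved two-pointer merge loop that builds the output as it goes is replaced by two staged passes: a first pass computes the xs-insertion index of each ys-element kept (breaking once the pointer exhausts xs), a second pass assembles the output by slicing xs around those insertion points.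
import Mathlib
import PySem

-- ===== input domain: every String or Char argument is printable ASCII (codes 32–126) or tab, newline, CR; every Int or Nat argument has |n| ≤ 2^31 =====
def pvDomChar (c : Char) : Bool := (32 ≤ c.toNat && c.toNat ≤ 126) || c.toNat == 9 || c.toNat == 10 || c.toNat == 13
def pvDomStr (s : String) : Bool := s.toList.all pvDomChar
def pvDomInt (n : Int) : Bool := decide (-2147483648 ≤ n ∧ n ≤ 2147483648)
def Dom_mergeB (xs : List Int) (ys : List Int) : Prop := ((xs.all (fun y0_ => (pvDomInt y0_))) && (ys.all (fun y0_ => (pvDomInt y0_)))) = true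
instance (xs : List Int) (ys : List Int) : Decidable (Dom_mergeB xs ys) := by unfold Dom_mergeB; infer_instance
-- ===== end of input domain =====

-- B replaces A's interleaved merge loop by two staged passes: first compute the xs-insertion
-- index of each kept ys-element, then assemble the output by slicing xs (objective: alternative).

-- ===== PORT A =====
-- A's while-loop over the two indices xi, yi; the remaining suffixes of xs and ys are
-- the state, the full xs is kept for the membership test 'ys[yi] in xs'.
def mergeB_goA (xsfull : List Int) : List Int → List Int → List Int → List Int
  | [], _, result => result
  | x :: xt, [], result => result ++ (x :: xt)
  | x :: xt, y :: yt, result =>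
    if x ≤ y then mergeB_goA xsfull xt (y :: yt) (result ++ [x])
    else mergeB_goA xsfull (x :: xt) yt (result ++ (if y ∈ xsfull then [y] else []))
termination_by xs ys _ => xs.length + ys.length

def mergeB (xs : List Int) (ys : List Int) : List Int := mergeB_goA xs xs ys []

-- ===== PORT B =====
-- stage-1 inner while-loop: 'while i < n and xs[i] <= y: i += 1'
def mergeB_adv (xs : List Int) (y : Int) (i : ℕ) : ℕ :=
  if h : i < xs.length then
    if xs[i] ≤ y then mergeB_adv xs y (i + 1) else i
  else i
termination_by xs.length - i

-- stage-1 for-loop over ys: the insertion index of each kept y, breaking once xs is exhausted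
def mergeB_pos (xs : List Int) : List Int → ℕ → List (ℕ × Int)
  | [], _ => []
  | y :: yt, i =>
    let i' := mergeB_adv xs y i
    if i' = xs.length then []                      -- break
    else if y ∈ xs then (i', y) :: mergeB_pos xs yt i'
    else mergeB_pos xs yt i'

-- stage-2 for-loop over pos with state (out, j); (xs.drop j).take (i - j) is xs[j:i]
-- (exact here: 0 ≤ j ≤ i) and xs.drop j is xs[j:].
def mergeB_asm (xs : List Int) : List (ℕ × Int) → ℕ → List Int → List Int
  | [], j, out => out ++ xs.drop j
  | (i, y) :: rest, j, out => mergeB_asm xs rest i (out ++ (xs.drop j).take (i - j) ++ [y])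

def mergeB_alt (xs : List Int) (ys : List Int) : List Int :=
  mergeB_asm xs (mergeB_pos xs ys 0) 0 []

-- ===== PRECONDITION & SPEC =====
def Spec_mergeB (xs : List Int) (ys : List Int) (out : List Int) : Prop := out = mergeB_alt xs ys
instance (xs : List Int) (ys : List Int) (out : List Int) : Decidable (Spec_mergeB xs ys out) := by unfold Spec_mergeB; infer_instance

-- ===== CLAIM (what is proved, stated in full; the proofs are below) =====
def Claim_equal_mergeB : Prop := ∀ (xs : List Int) (ys : List Int), Dom_mergeB xs ys → Spec_mergeB xs ys (mergeB xs ys)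

-- ===== LEMMAS AND PROOFS =====

theorem mergeB_adv_ge (xs : List Int) (y : Int) (i : ℕ) : i ≤ mergeB_adv xs y i := by
  unfold mergeB_adv
  split
  · split
    · exact le_trans (Nat.le_succ i) (mergeB_adv_ge xs y (i + 1))
    · exact le_refl i
  · exact le_refl i
termination_by xs.length - i

theorem mergeB_adv_le (xs : List Int) (y : Int) (i : ℕ) (h : i ≤ xs.length) :
    mergeB_adv xs y i ≤ xs.length := by
  unfold mergeB_adv
  split
  · split
    · exact mergeB_adv_le xs y (i + 1) (by omega)
    · omega
  · omega
termination_by xs.length - i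

-- A's steps while xs[xi] ≤ y, compressed: the merge pointer moves to mergeB_adv xs y i
theorem mergeB_adv_goA (xs : List Int) (y : Int) (yt : List Int) :
    ∀ i, i ≤ xs.length → ∀ out,
      mergeB_goA xs (xs.drop i) (y :: yt) out =
        if mergeB_adv xs y i = xs.length then out ++ xs.drop i
        else mergeB_goA xs (xs.drop (mergeB_adv xs y i)) yt
              (out ++ (xs.drop i).take (mergeB_adv xs y i - i) ++
                (if y ∈ xs then [y] else [])) := by
  intro i
  induction hk : xs.length - i using Nat.strong_induction_on generalizing i with
  | _ k ih =>
  intro hi out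
  by_cases hlt : i < xs.length
  · have hdrop : xs.drop i = xs[i] :: xs.drop (i + 1) := List.drop_eq_getElem_cons hlt
    by_cases hle : xs[i] ≤ y
    · have hadv : mergeB_adv xs y i = mergeB_adv xs y (i + 1) := by
        conv_lhs => rw [mergeB_adv]
        rw [dif_pos hlt, if_pos hle]
      rw [hdrop, mergeB_goA, if_pos hle,
          ih (xs.length - (i + 1)) (by omega) (i + 1) rfl (by omega) (out ++ [xs[i]])]
      rw [hadv]
      split
      · simp
      · have h1 : i + 1 ≤ mergeB_adv xs y (i + 1) := mergeB_adv_ge xs y (i + 1)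
        have htake : (xs[i] :: xs.drop (i + 1)).take (mergeB_adv xs y (i + 1) - i) =
            xs[i] :: (xs.drop (i + 1)).take (mergeB_adv xs y (i + 1) - (i + 1)) := by
          have hsucc : mergeB_adv xs y (i + 1) - i = (mergeB_adv xs y (i + 1) - (i + 1)) + 1 := by
            omega
          rw [hsucc, List.take_succ_cons]
        rw [htake]
        simp
    · have hadv : mergeB_adv xs y i = i := by
        conv_lhs => rw [mergeB_adv]
        rw [dif_pos hlt, if_neg hle]
      rw [hadv, if_neg (by omega)]
      rw [hdrop, mergeB_goA, if_neg hle, ← hdrop]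
      simp
  · have hieq : i = xs.length := by omega
    have hadv : mergeB_adv xs y i = i := by
      conv_lhs => rw [mergeB_adv]
      rw [dif_neg hlt]
    rw [hadv, if_pos hieq, hieq]
    simp [mergeB_goA]

-- gluing two adjacent slices of xs in the assembler's accumulator
theorem mergeB_asm_glue (xs : List Int) (pos : List (ℕ × Int)) (j j' : ℕ)
    (hjj : j ≤ j')
    (hfst : ∀ p ∈ pos.head?, j' ≤ p.1) :
    ∀ out, mergeB_asm xs pos j' (out ++ (xs.drop j).take (j' - j)) =
      mergeB_asm xs pos j out := by
  intro out
  have hdd : (xs.drop j).drop (j' - j) = xs.drop j' := by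
    rw [List.drop_drop]
    congr 1
    omega
  cases pos with
  | nil =>
    simp only [mergeB_asm, List.append_assoc]
    congr 1
    conv_rhs => rw [← List.take_append_drop (j' - j) (xs.drop j)]
    rw [hdd]
  | cons p rest =>
    obtain ⟨i, y⟩ := p
    have hji : j' ≤ i := hfst (i, y) (by simp)
    have key : (xs.drop j).take (j' - j) ++ (xs.drop j').take (i - j') =
        (xs.drop j).take (i - j) := by
      rw [← hdd, ← List.take_add]
      congr 1
      omega
    simp only [mergeB_asm]
    congr 1
    rw [List.append_assoc out, key]

theorem mergeB_pos_head_ge (xs : List Int) (ys : List Int) :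
    ∀ i, ∀ p ∈ (mergeB_pos xs ys i).head?, i ≤ p.1 := by
  induction ys with
  | nil => intro i p hp; simp [mergeB_pos] at hp
  | cons y yt ih =>
    intro i p hp
    simp only [mergeB_pos] at hp
    have hge := mergeB_adv_ge xs y i
    split at hp
    · simp at hp
    · split at hp
      · simp at hp
        rw [← hp]
        exact hge
      · exact le_trans hge (ih (mergeB_adv xs y i) p hp)

-- the main invariant: A's loop from pointer i equals stage-2 run on stage-1's output from i
theorem mergeB_main (xs : List Int) (ys : List Int) :
    ∀ i, i ≤ xs.length → ∀ out,
      mergeB_goA xs (xs.drop i) ys out = mergeB_asm xs (mergeB_pos xs ys i) i out := by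
  induction ys with
  | nil =>
    intro i hi out
    cases h : xs.drop i with
    | nil => simp [mergeB_goA, mergeB_pos, mergeB_asm, h]
    | cons a t => simp [mergeB_goA, mergeB_pos, mergeB_asm, h]
  | cons y yt ih =>
    intro i hi out
    rw [mergeB_adv_goA xs y yt i hi out]
    have hle := mergeB_adv_le xs y i hi
    have hge := mergeB_adv_ge xs y i
    simp only [mergeB_pos]
    split
    · simp [mergeB_asm]
    · next _hlen =>
      rw [ih (mergeB_adv xs y i) hle]
      by_cases hmem : y ∈ xs
      · rw [if_pos hmem, if_pos hmem]
        simp [mergeB_asm]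
      · rw [if_neg hmem, if_neg hmem]
        simp only [List.append_nil]
        exact mergeB_asm_glue xs (mergeB_pos xs yt (mergeB_adv xs y i)) i
          (mergeB_adv xs y i) hge (mergeB_pos_head_ge xs yt (mergeB_adv xs y i)) out

-- ===== VERDICT (by name: the statement is the Claim_ definition above) =====
theorem mergeB_spec : Claim_equal_mergeB := by
  intro xs ys _
  unfold Spec_mergeB mergeB mergeB_alt
  simpa using mergeB_main xs ys 0 (Nat.zero_le _) []
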